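-- pv_equiv track=rewrite | github.com/lindajoy/DSAs | assignments/knowing-what-to-track/house.robber.py | maxAmountRobberRobs2
-- ===== SOURCE A (Python) =====
-- def maxAmountRobberRobs2(arr):
--     maxMoney = 0
--
--     for i in range(len(arr)):
--         sliced_arr = arr[i+2 : len(arr)]
--         if (len(sliced_arr) > 0):
--             max_on_sliced = max(sliced_arr)
--         else:
--             max_on_sliced = 0
--
--         temp = (arr[i] + max_on_sliced)
--
--         maxMoney = max(temp, maxMoney)
--
--     return maxMoney
-- ===== SOURCE B (Python) =====
-- def maxAmountRobberRobs2(arr):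
--     # One backward pass maintaining suffix maxima: m1 = max(arr[i+1:]), m2 = max(arr[i+2:])
--     best = 0
--     m1 = None
--     m2 = None
--     for x in reversed(arr):
--         cand = x + (m2 if m2 is not None else 0)
--         if cand > best:
--             best = cand
--         m2 = m1
--         m1 = x if m1 is None else max(m1, x)
--     return best
-- ===== Notes on version B (the rewrite author's own statement) =====
-- stated objective: faster
-- what changed: Replaced the per-index slice-and-max rescans with a single backward pass that maintains the two suffix maxima max(arr[i+1:]) and max(arr[i+2:]) as running state.
import Mathlib
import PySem

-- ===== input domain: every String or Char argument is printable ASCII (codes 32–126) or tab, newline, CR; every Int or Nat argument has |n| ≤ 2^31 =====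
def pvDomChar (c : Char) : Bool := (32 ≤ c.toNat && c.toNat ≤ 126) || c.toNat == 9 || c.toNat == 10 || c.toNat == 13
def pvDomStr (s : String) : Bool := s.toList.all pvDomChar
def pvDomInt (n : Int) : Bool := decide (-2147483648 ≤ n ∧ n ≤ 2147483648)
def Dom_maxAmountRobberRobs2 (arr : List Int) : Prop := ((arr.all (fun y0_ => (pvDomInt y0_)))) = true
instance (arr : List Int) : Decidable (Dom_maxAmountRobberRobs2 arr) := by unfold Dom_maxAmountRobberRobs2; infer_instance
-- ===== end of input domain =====

-- B replaces A's per-index slice rescans (O(n^2)) with one backward pass maintaining two running suffix maxima (O(n)).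


-- ===== PORT A =====
-- hand port of Python's max() on a nonempty int list (exact: left fold of binary max over the elements)
def pyMaxNE (xs : List Int) : Int :=
  match xs with
  | [] => 0
  | y :: ys => ys.foldl max y

def maxAmountRobberRobs2 (arr : List Int) : Int :=
  (PySem.List.pyRange 0 arr.length 1).foldl (fun maxMoney i =>
    let sliced := PySem.List.slice arr (some (i + 2)) (some (arr.length : Int))
    let max_on_sliced := if sliced.length > 0 then pyMaxNE sliced else 0
    let temp := PySem.List.pyGetD arr i 0 + max_on_sliced
    max temp maxMoney) 0

-- ===== PORT B =====
def maxAmountRobberRobs2_alt (arr : List Int) : Int :=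
  (arr.reverse.foldl (fun (st : Int × Option Int × Option Int) x =>
      let best := st.1
      let m1 := st.2.1
      let m2 := st.2.2
      let cand := x + (match m2 with | some m => m | none => 0)
      let best' := if cand > best then cand else best
      (best', some (match m1 with | none => x | some m => max m x), m1))
    (0, none, none)).1

-- ===== PRECONDITION & SPEC =====
def Spec_maxAmountRobberRobs2 (arr : List Int) (out : Int) : Prop := out = maxAmountRobberRobs2_alt arr
instance (arr : List Int) (out : Int) : Decidable (Spec_maxAmountRobberRobs2 arr out) := by unfold Spec_maxAmountRobberRobs2; infer_instance

-- ===== CLAIM (what is proved, stated in full; the proofs are below) =====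
def Claim_equal_maxAmountRobberRobs2 : Prop := ∀ (arr : List Int), Dom_maxAmountRobberRobs2 arr → Spec_maxAmountRobberRobs2 arr (maxAmountRobberRobs2 arr)

-- ===== LEMMAS AND PROOFS =====

-- 'max of a suffix, 0 when empty' as A computes it
def mosD (ys : List Int) : Int := if ys.length > 0 then pyMaxNE ys else 0

-- clean common spec of both programs
def specF : List Int → Int
  | [] => 0
  | x :: xs => max (x + mosD xs.tail) (specF xs)

-- optional running maximum as B maintains it
def mOpt : List Int → Option Int
  | [] => none
  | x :: xs => some (match mOpt xs with | none => x | some m => max m x)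

theorem foldlCongrMem {α β : Type} (l : List α) (f g : β → α → β) (init : β)
    (h : ∀ b a, a ∈ l → f b a = g b a) : l.foldl f init = l.foldl g init := by
  induction l generalizing init with
  | nil => rfl
  | cons y ys ih =>
    simp only [List.foldl_cons]
    rw [h init y (List.mem_cons_self)]
    exact ih _ (fun b a ha => h b a (List.mem_cons_of_mem _ ha))

theorem foldl_max_shift (l : List Int) : ∀ a b : Int, l.foldl max (max a b) = max (l.foldl max a) b := by
  induction l with
  | nil => intro a b; rfl
  | cons y ys ih =>
    intro a b
    simp only [List.foldl_cons]
    rw [max_right_comm]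
    exact ih (max a y) b

theorem mOpt_cons (xs : List Int) : ∀ x : Int, mOpt (x :: xs) = some (xs.foldl max x) := by
  induction xs with
  | nil => intro x; rfl
  | cons y zs ih =>
    intro x
    rw [show mOpt (x :: y :: zs)
        = some (match mOpt (y :: zs) with | none => x | some m => max m x) from rfl, ih y]
    simp only [List.foldl_cons]
    rw [max_comm x y, foldl_max_shift zs y x]

theorem mOpt_getD (ys : List Int) : (match mOpt ys with | some m => m | none => 0) = mosD ys := by
  cases ys with
  | nil => rfl
  | cons x xs => rw [mOpt_cons]; rfl

-- init pull-out for folds that combine with max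
theorem foldl_max_init (g : Nat → Int) (l : List Nat) : ∀ c b : Int,
    l.foldl (fun a k => max (g k) a) (max c b) = max c (l.foldl (fun a k => max (g k) a) b) := by
  induction l with
  | nil => intro c b; rfl
  | cons y ys ih =>
    intro c b
    simp only [List.foldl_cons]
    rw [max_left_comm]
    exact ih c (max (g y) b)

def gA (arr : List Int) (k : Nat) : Int := arr.getD k 0 + mosD (arr.drop (k + 2))

theorem A_eq_rangeFold (arr : List Int) :
    maxAmountRobberRobs2 arr = (List.range arr.length).foldl (fun a k => max (gA arr k) a) 0 := by
  unfold maxAmountRobberRobs2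
  rw [PySem.List.pyRange_one, List.foldl_map]
  apply foldlCongrMem
  intro a k hk
  rw [List.mem_range] at hk
  have h2 : (0 : Int) + (k : Int) + 2 = ((k + 2 : Nat) : Int) := by push_cast; ring
  rw [h2, PySem.List.slice_natCast]
  have hdt : ((arr.drop (k + 2)).take (arr.length - (k + 2))) = arr.drop (k + 2) := by
    apply List.take_of_length_le; simp
  rw [hdt]
  have hg : PySem.List.pyGetD arr ((0 : Int) + (k : Int)) 0 = arr.getD k 0 := by
    rw [zero_add, PySem.List.pyGetD_natCast]
  simp only [hg, gA, mosD]

theorem rangeFold_cons (x : Int) (xs : List Int) :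
    (List.range (x :: xs).length).foldl (fun a k => max (gA (x :: xs) k) a) 0
      = max (gA (x :: xs) 0) ((List.range xs.length).foldl (fun a k => max (gA xs k) a) 0) := by
  rw [List.length_cons, List.range_succ_eq_map, List.foldl_cons, List.foldl_map]
  rw [foldlCongrMem (List.range xs.length) _ (fun a k => max (gA xs k) a) _
    (by intro b k _; simp [gA])]
  exact foldl_max_init (fun k => gA xs k) (List.range xs.length) (gA (x :: xs) 0) 0

theorem A_eq_specF (arr : List Int) : maxAmountRobberRobs2 arr = specF arr := by
  induction arr with
  | nil => rfl
  | cons x xs ih =>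
    rw [A_eq_rangeFold, rangeFold_cons, ← A_eq_rangeFold, ih]
    have h0 : gA (x :: xs) 0 = x + mosD xs.tail := by
      simp [gA, List.drop_succ_cons, List.drop_one]
    rw [h0]; rfl

theorem B_invariant (arr : List Int) :
    arr.foldr (fun x (st : Int × Option Int × Option Int) =>
      let best := st.1
      let m1 := st.2.1
      let m2 := st.2.2
      let cand := x + (match m2 with | some m => m | none => 0)
      let best' := if cand > best then cand else best
      (best', some (match m1 with | none => x | some m => max m x), m1))
      (0, none, none)
      = (specF arr, mOpt arr, mOpt arr.tail) := by
  induction arr with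
  | nil => rfl
  | cons x xs ih =>
    rw [List.foldr_cons, ih]
    simp only [specF, mOpt, List.tail_cons]
    refine Prod.ext ?_ rfl
    simp only [mOpt_getD]
    rcases le_or_gt (x + mosD xs.tail) (specF xs) with h | h
    · simp [not_lt.mpr h, max_eq_right h]
    · simp [h, max_eq_left (le_of_lt h)]

theorem B_eq_specF (arr : List Int) : maxAmountRobberRobs2_alt arr = specF arr := by
  unfold maxAmountRobberRobs2_alt
  rw [List.foldl_reverse]
  exact congrArg Prod.fst (B_invariant arr)

-- ===== VERDICT (by name: the statement is the Claim_ definition above) =====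
theorem maxAmountRobberRobs2_spec : Claim_equal_maxAmountRobberRobs2 := by
  intro arr _
  unfold Spec_maxAmountRobberRobs2
  rw [A_eq_specF, B_eq_specF]
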